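-- pv_equiv track=rewrite | github.com/Silverdono/secret-sharing-protocols | utils.py | generateVandermondeMatrix
-- ===== SOURCE A (Python) =====
-- def generateVandermondeMatrix(t, l, w, order):
--
--         vandermonde = []
--
--         for i in range(l):
--             row = []
--             for j in range(l + t):
--                 tmp = pow(w, i * j, order)
--                 if tmp == 0:
--                     tmp = 1
--                 row.append(tmp)
--             vandermonde.append(row)
--
--         return vandermonde
-- ===== SOURCE B (Python) =====
-- def generateVandermondeMatrix(t, l, w, order):
--     # Incremental row: each entry is the previous one times base = w^i mod order,
--     # instead of a fresh modular exponentiation per cell.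
--     cols = l + t
--     vandermonde = []
--     for i in range(l):
--         base = pow(w, i, order)
--         cur = 1 % order
--         row = []
--         for _ in range(cols):
--             row.append(1 if cur == 0 else cur)
--             cur = cur * base % order
--         vandermonde.append(row)
--     return vandermonde
-- ===== Notes on version B (the rewrite author's own statement) =====
-- stated objective: faster
-- what changed: B builds each row by one modular multiplication per cell from base = w^i mod order, instead of A's full pow(w, i*j, order) modular exponentiation for every cell.
-- outside the precondition, e.g. on generateVandermondeMatrix(-2, 1, 2, 0): A returns [[]], B raises ValueError
import Mathlib
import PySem

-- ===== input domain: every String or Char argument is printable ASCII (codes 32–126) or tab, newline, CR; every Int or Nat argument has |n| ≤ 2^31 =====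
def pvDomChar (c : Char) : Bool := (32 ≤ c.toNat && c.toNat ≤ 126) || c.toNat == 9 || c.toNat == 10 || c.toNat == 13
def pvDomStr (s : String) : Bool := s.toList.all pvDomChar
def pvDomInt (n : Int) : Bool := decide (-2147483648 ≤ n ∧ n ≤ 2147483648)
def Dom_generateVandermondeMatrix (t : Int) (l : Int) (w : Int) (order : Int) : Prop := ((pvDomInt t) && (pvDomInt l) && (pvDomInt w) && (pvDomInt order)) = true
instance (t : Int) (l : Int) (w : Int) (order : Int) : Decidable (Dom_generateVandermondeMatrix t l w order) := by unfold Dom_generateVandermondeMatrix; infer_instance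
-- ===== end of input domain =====

-- B builds each row by one modular multiplication per cell from base = w^i mod order,
-- instead of A's full modular exponentiation pow(w, i*j, order) per cell (objective: faster).

-- ===== PORT A =====
def generateVandermondeMatrix (t : Int) (l : Int) (w : Int) (order : Int) : List (List Int) :=
  (PySem.List.pyRange 0 l).foldl (fun vandermonde i =>
    let row := (PySem.List.pyRange 0 (l + t)).foldl (fun row j =>
      let tmp := PySem.Int.powMod w (i * j).toNat order   -- pow(w, i*j, order); i, j ≥ 0 from range
      let tmp := if tmp = 0 then 1 else tmp
      row ++ [tmp]) []
    vandermonde ++ [row]) []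

-- ===== PORT B =====
def generateVandermondeMatrix_alt (t : Int) (l : Int) (w : Int) (order : Int) : List (List Int) :=
  let cols := l + t
  (PySem.List.pyRange 0 l).foldl (fun vandermonde i =>
    let base := PySem.Int.powMod w i.toNat order          -- pow(w, i, order); i ≥ 0 from range
    let st := (PySem.List.pyRange 0 cols).foldl (fun (st : List Int × Int) _ =>
      (st.1 ++ [if st.2 = 0 then 1 else st.2], PySem.Int.mod (st.2 * base) order))
      ([], PySem.Int.mod 1 order)
    vandermonde ++ [st.1]) []

-- ===== PRECONDITION & SPEC =====
-- Pre_ excludes order == 0 whenever l ≥ 1: there Python A raises ValueError from pow,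
-- except in the degenerate case l + t ≤ 0 where A returns a list of empty rows only
-- because it never calls pow, while B's natural per-row pow(w, i, order) raises.
def Pre_generateVandermondeMatrix (t : Int) (l : Int) (w : Int) (order : Int) : Prop :=
  order ≠ 0 ∨ l ≤ 0
instance (t : Int) (l : Int) (w : Int) (order : Int) : Decidable (Pre_generateVandermondeMatrix t l w order) := by unfold Pre_generateVandermondeMatrix; infer_instance

def pvWitness_generateVandermondeMatrix : Int × Int × Int × Int := (1, 2, 3, 5)

def Spec_generateVandermondeMatrix (t : Int) (l : Int) (w : Int) (order : Int) (out : List (List Int)) : Prop := out = generateVandermondeMatrix_alt t l w order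
instance (t : Int) (l : Int) (w : Int) (order : Int) (out : List (List Int)) : Decidable (Spec_generateVandermondeMatrix t l w order out) := by unfold Spec_generateVandermondeMatrix; infer_instance

-- ===== CLAIM (what is proved, stated in full; the proofs are below) =====
def Claim_equal_generateVandermondeMatrix : Prop := ∀ (t : Int) (l : Int) (w : Int) (order : Int), Dom_generateVandermondeMatrix t l w order → Pre_generateVandermondeMatrix t l w order → Spec_generateVandermondeMatrix t l w order (generateVandermondeMatrix t l w order)

-- ===== LEMMAS AND PROOFS =====

-- Python's fmod depends only on the residue class (any modulus, including 0).
theorem pv_fmod_congr (a b m : Int) (h : a % m = b % m) : Int.fmod a m = Int.fmod b m := by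
  have hd : m ∣ a ↔ m ∣ b := by
    rw [Int.dvd_iff_emod_eq_zero, Int.dvd_iff_emod_eq_zero, h]
  rw [Int.fmod_eq_emod, Int.fmod_eq_emod, h]
  by_cases h0 : 0 ≤ m
  · simp [h0]
  · by_cases hda : m ∣ a
    · simp [hda, hd.mp hda]
    · simp [hda, (not_iff_not.mpr hd).mp hda]

theorem pv_fmod_emod (a m : Int) : Int.fmod a m % m = a % m := by
  rw [Int.fmod_eq_emod]
  split
  · simp [Int.emod_emod_of_dvd]
  · simpa using Int.add_mul_emod_self_left (a := a % m) (b := m) (c := 1)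

-- one multiplication step of B's running product advances the exponent by e
theorem pv_cur_step (w order : Int) (e k : Nat) :
    PySem.Int.mod (PySem.Int.mod (w ^ (e * k)) order * PySem.Int.mod (w ^ e) order) order
      = PySem.Int.mod (w ^ (e * (k + 1))) order := by
  unfold PySem.Int.mod
  apply pv_fmod_congr
  rw [Int.mul_emod, pv_fmod_emod, pv_fmod_emod, ← Int.mul_emod, ← pow_add]
  ring_nf

-- invariant of B's inner loop: after n steps the row equals A's row and cur = w^(i·n) mod order
theorem pv_inner_row (w order i : Int) (hi : 0 ≤ i) (n : Nat) :
    (PySem.List.pyRange 0 (n : Int)).foldl (fun (st : List Int × Int) _ =>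
        (st.1 ++ [if st.2 = 0 then 1 else st.2],
         PySem.Int.mod (st.2 * PySem.Int.powMod w i.toNat order) order))
      ([], PySem.Int.mod 1 order)
    = ((PySem.List.pyRange 0 (n : Int)).foldl (fun row j =>
        let tmp := PySem.Int.powMod w (i * j).toNat order
        let tmp := if tmp = 0 then 1 else tmp
        row ++ [tmp]) [],
       PySem.Int.mod (w ^ (i.toNat * n)) order) := by
  induction n with
  | zero => simp [PySem.List.pyRange]
  | succ n ih =>
    have hrange : PySem.List.pyRange 0 ((n + 1 : Nat) : Int) = PySem.List.pyRange 0 (n : Int) ++ [(n : Int)] := by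
      push_cast
      exact PySem.List.pyRange_one_succ_right (by positivity)
    have htn : (i * (n : Int)).toNat = i.toNat * n := by
      rw [Int.toNat_mul hi (by positivity)]
      simp
    rw [hrange, List.foldl_append, List.foldl_append, ih]
    simp only [List.foldl_cons, List.foldl_nil, Prod.mk.injEq]
    constructor
    · simp [PySem.Int.powMod, htn]
    · rw [PySem.Int.powMod, pv_cur_step]

theorem pv_range_toNat (m : Int) : PySem.List.pyRange 0 m = PySem.List.pyRange 0 ((m.toNat : Nat) : Int) := by
  by_cases h : 0 ≤ m
  · rw [Int.toNat_of_nonneg h]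
  · rw [Int.toNat_of_nonpos (le_of_not_ge h)]
    simp [PySem.List.pyRange]
    omega

theorem pv_main (t l w order : Int) :
    generateVandermondeMatrix t l w order = generateVandermondeMatrix_alt t l w order := by
  unfold generateVandermondeMatrix generateVandermondeMatrix_alt
  apply PySem.List.foldl_congr_mem
  intro acc i hi
  have h0i : 0 ≤ i := by
    have := PySem.List.mem_pyRange_one.mp hi
    omega
  have := pv_inner_row w order i h0i (l + t).toNat
  rw [pv_range_toNat (l + t)]
  simp only [this]

-- ===== VERDICT (by name: the statement is the Claim_ definition above) =====
theorem generateVandermondeMatrix_spec : Claim_equal_generateVandermondeMatrix := by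
  intro t l w order _ _
  unfold Spec_generateVandermondeMatrix
  exact pv_main t l w order
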